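-- pv_equiv track=rewrite | github.com/agnJason/PianoMotion10M | datasets/utils.py | find_showed
-- ===== SOURCE A (Python) =====
-- def find_showed(is_missed, threshold=15):
--     is_missed = is_missed.copy()
--     unshowed_idx = []
--     count_missed = 0
--     tmp_idx = []
--     for idx, value in enumerate(is_missed):
--         if value == 1:
--             if count_missed <= threshold:
--                 unshowed_idx = unshowed_idx + tmp_idx
--             count_missed = 0
--             tmp_idx = []
--         if value == 0:
--             count_missed += 1
--             tmp_idx.append(idx)
--     if count_missed <= threshold:
--         unshowed_idx = unshowed_idx + tmp_idx
--     return unshowed_idx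
-- ===== SOURCE B (Python) =====
-- def find_showed(is_missed, threshold=15):
--     is_missed = is_missed.copy()
--     # Pass 1: label every zero position with the number of 1s seen before it;
--     # zeros in the same run share a label, distinct runs get distinct labels.
--     zeros = []
--     ones = 0
--     for idx, value in enumerate(is_missed):
--         if value == 1:
--             ones += 1
--         elif value == 0:
--             zeros.append((ones, idx))
--     # Pass 2: count run sizes with a hash index keyed by label.
--     sizes = {}
--     for run, _ in zeros:
--         sizes[run] = sizes.get(run, 0) + 1
--     # Pass 3: keep the zero indices whose run is short enough.
--     return [idx for run, idx in zeros if sizes[run] <= threshold]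
-- ===== Notes on version B (the rewrite author's own statement) =====
-- stated objective: alternative
-- what changed: Instead of A's fused run-accumulator loop (running count, tmp segment, flush on 1), B labels each zero index with the count of preceding 1s (a run id), builds a dict of run sizes keyed by those labels, and filters the labelled zeros by looking their run size up in the dict.
import Mathlib
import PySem

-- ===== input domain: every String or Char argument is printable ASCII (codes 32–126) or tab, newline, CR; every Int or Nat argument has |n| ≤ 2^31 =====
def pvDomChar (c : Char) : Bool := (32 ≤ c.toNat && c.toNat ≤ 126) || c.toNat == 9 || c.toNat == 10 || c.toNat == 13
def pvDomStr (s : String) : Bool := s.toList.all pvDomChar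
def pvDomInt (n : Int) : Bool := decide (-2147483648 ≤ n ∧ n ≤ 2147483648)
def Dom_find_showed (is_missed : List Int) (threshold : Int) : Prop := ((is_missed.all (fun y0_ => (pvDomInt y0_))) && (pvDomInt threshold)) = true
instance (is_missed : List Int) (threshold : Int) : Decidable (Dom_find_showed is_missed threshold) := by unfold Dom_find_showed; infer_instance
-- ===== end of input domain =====

-- B replaces A's fused run-accumulator loop by: label each zero index with the
-- number of preceding 1s (its run id), count run sizes in a dict, then filter
-- the labelled zeros by dict lookup; objective: alternative.


-- ===== PORT A =====
-- loop body of A: state = (unshowed_idx, count_missed, tmp_idx)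
def fsStepA (threshold : Int) (s : List Int × Int × List Int) (p : Int × Int) :
    List Int × Int × List Int :=
  let s1 : List Int × Int × List Int :=
    if p.2 == 1 then ((if s.2.1 ≤ threshold then s.1 ++ s.2.2 else s.1), 0, [])
    else s
  if p.2 == 0 then (s1.1, s1.2.1 + 1, s1.2.2 ++ [p.1]) else s1

def find_showed (is_missed : List Int) (threshold : Int) : List Int :=
  let st := (PySem.List.enumerate is_missed).foldl (fsStepA threshold) ([], 0, [])
  if st.2.1 ≤ threshold then st.1 ++ st.2.2 else st.1

-- ===== PORT B =====
-- pass 1 of B: state = (zeros, ones)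
def fsZeroStep (s : List (Int × Int) × Int) (p : Int × Int) : List (Int × Int) × Int :=
  if p.2 == 1 then (s.1, s.2 + 1)
  else if p.2 == 0 then (s.1 ++ [(s.2, p.1)], s.2)
  else s

def find_showed_alt (is_missed : List Int) (threshold : Int) : List Int :=
  let zeros := ((PySem.List.enumerate is_missed).foldl fsZeroStep ([], 0)).1
  -- pass 2: sizes[run] = sizes.get(run, 0) + 1
  let sizes := zeros.foldl (fun d p => d.insert p.1 (d.getD p.1 0 + 1)) PySem.Dict.empty
  -- pass 3: sizes[run] lookup; every run key is present, so getD is exact here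
  (zeros.filter (fun p => sizes.getD p.1 0 ≤ threshold)).map Prod.snd

-- ===== PRECONDITION & SPEC =====
def Spec_find_showed (is_missed : List Int) (threshold : Int) (out : List Int) : Prop := out = find_showed_alt is_missed threshold
instance (is_missed : List Int) (threshold : Int) (out : List Int) : Decidable (Spec_find_showed is_missed threshold out) := by unfold Spec_find_showed; infer_instance

-- ===== CLAIM (what is proved, stated in full; the proofs are below) =====
def Claim_equal_find_showed : Prop := ∀ (is_missed : List Int) (threshold : Int), Dom_find_showed is_missed threshold → Spec_find_showed is_missed threshold (find_showed is_missed threshold)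

-- ===== LEMMAS AND PROOFS =====

-- proof-only intermediate: split the indices into zero-run segments delimited by 1s
def fsStepB (s : List (List Int) × List Int) (p : Int × Int) : List (List Int) × List Int :=
  if p.2 == 0 then (s.1, s.2 ++ [p.1])
  else if p.2 == 1 then (s.1 ++ [s.2], [])
  else s

-- flatten of the segments short enough to keep
def fsKeep (threshold : Int) (segs : List (List Int)) : List Int :=
  (segs.filter (fun seg => (seg.length : Int) ≤ threshold)).flatten

theorem fsKeep_append_singleton (threshold : Int) (segs : List (List Int)) (cur : List Int) :
    fsKeep threshold (segs ++ [cur]) =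
      if (cur.length : Int) ≤ threshold then fsKeep threshold segs ++ cur
      else fsKeep threshold segs := by
  simp only [fsKeep, List.filter_append, List.flatten_append]
  by_cases h : (cur.length : Int) ≤ threshold <;> simp [h]

-- invariant linking A's fold state to the segment fold
theorem fsInvA (threshold : Int) (l : List (Int × Int)) :
    ∀ (segs : List (List Int)) (cur : List Int),
      l.foldl (fsStepA threshold) (fsKeep threshold segs, (cur.length : Int), cur) =
      (fsKeep threshold ((l.foldl fsStepB (segs, cur)).1),
        (((l.foldl fsStepB (segs, cur)).2).length : Int),
        (l.foldl fsStepB (segs, cur)).2) := by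
  induction l with
  | nil => intro segs cur; simp
  | cons p l ih =>
    intro segs cur
    by_cases h0 : p.2 = 0
    · have hA : fsStepA threshold (fsKeep threshold segs, (cur.length : Int), cur) p
          = (fsKeep threshold segs, ((cur ++ [p.1]).length : Int), cur ++ [p.1]) := by
        simp [fsStepA, h0]
      have hB : fsStepB (segs, cur) p = (segs, cur ++ [p.1]) := by simp [fsStepB, h0]
      rw [List.foldl_cons, List.foldl_cons, hA, hB, ih]
    · by_cases h1 : p.2 = 1
      · have hA : fsStepA threshold (fsKeep threshold segs, (cur.length : Int), cur) p
            = (fsKeep threshold (segs ++ [cur]), ((([] : List Int)).length : Int), []) := by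
          simp [fsStepA, h1, fsKeep_append_singleton]
        have hB : fsStepB (segs, cur) p = (segs ++ [cur], []) := by simp [fsStepB, h1]
        rw [List.foldl_cons, List.foldl_cons, hA, hB, ih]
      · have hA : fsStepA threshold (fsKeep threshold segs, (cur.length : Int), cur) p
            = (fsKeep threshold segs, (cur.length : Int), cur) := by
          simp [fsStepA, h0, h1]
        have hB : fsStepB (segs, cur) p = (segs, cur) := by simp [fsStepB, h0, h1]
        rw [List.foldl_cons, List.foldl_cons, hA, hB, ih]

-- label each index of segment number j (counting from k) with k + j
def labFrom (k : Int) : List (List Int) → List (Int × Int)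
  | [] => []
  | s :: rest => s.map (fun i => (k, i)) ++ labFrom (k + 1) rest

theorem labFrom_append_singleton (k : Int) (segs : List (List Int)) (cur : List Int) :
    labFrom k (segs ++ [cur]) = labFrom k segs ++ cur.map (fun i => (k + segs.length, i)) := by
  induction segs generalizing k with
  | nil => simp [labFrom]
  | cons s rest ih =>
    simp only [List.cons_append, labFrom, ih (k + 1), List.append_assoc, List.length_cons]
    have h : k + 1 + (rest.length : Int) = k + ((rest.length : Int) + 1) := by ring
    rw [h]
    norm_cast

-- invariant linking B's first pass to the segment fold
theorem fsInvZ (l : List (Int × Int)) :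
    ∀ (segs : List (List Int)) (cur : List Int),
      l.foldl fsZeroStep
        (labFrom 0 segs ++ cur.map (fun i => ((segs.length : Int), i)), (segs.length : Int)) =
      (labFrom 0 ((l.foldl fsStepB (segs, cur)).1) ++
        ((l.foldl fsStepB (segs, cur)).2).map
          (fun i => ((((l.foldl fsStepB (segs, cur)).1).length : Int), i)),
        (((l.foldl fsStepB (segs, cur)).1).length : Int)) := by
  induction l with
  | nil => intro segs cur; simp
  | cons p l ih =>
    intro segs cur
    by_cases h0 : p.2 = 0
    · have hZ : fsZeroStep (labFrom 0 segs ++ cur.map (fun i => ((segs.length : Int), i)),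
            (segs.length : Int)) p
          = (labFrom 0 segs ++ (cur ++ [p.1]).map (fun i => ((segs.length : Int), i)),
            (segs.length : Int)) := by
        simp [fsZeroStep, h0]
      have hB : fsStepB (segs, cur) p = (segs, cur ++ [p.1]) := by simp [fsStepB, h0]
      rw [List.foldl_cons, List.foldl_cons, hZ, hB, ih]
    · by_cases h1 : p.2 = 1
      · have hZ : fsZeroStep (labFrom 0 segs ++ cur.map (fun i => ((segs.length : Int), i)),
              (segs.length : Int)) p
            = (labFrom 0 (segs ++ [cur]) ++ ([] : List Int).map
                (fun i => (((segs ++ [cur]).length : Int), i)), ((segs ++ [cur]).length : Int)) := by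
          simp [fsZeroStep, h1, labFrom_append_singleton]
        have hB : fsStepB (segs, cur) p = (segs ++ [cur], []) := by simp [fsStepB, h1]
        rw [List.foldl_cons, List.foldl_cons, hZ, hB, ih]
      · have hZ : fsZeroStep (labFrom 0 segs ++ cur.map (fun i => ((segs.length : Int), i)),
              (segs.length : Int)) p
            = (labFrom 0 segs ++ cur.map (fun i => ((segs.length : Int), i)),
              (segs.length : Int)) := by
          simp [fsZeroStep, h0, h1]
        have hB : fsStepB (segs, cur) p = (segs, cur) := by simp [fsStepB, h0, h1]
        rw [List.foldl_cons, List.foldl_cons, hZ, hB, ih]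

-- labels below k do not occur in labFrom k
theorem count_labFrom_lt (segs : List (List Int)) :
    ∀ (k r : Int), r < k → ((labFrom k segs).map Prod.fst).count r = 0 := by
  induction segs with
  | nil => intro k r _; simp [labFrom]
  | cons s rest ih =>
    intro k r hr
    simp only [labFrom, List.map_append, List.count_append, ih (k + 1) r (by omega)]
    have h : (s.map (fun i => (k, i))).map Prod.fst = s.map (fun _ => k) := by
      simp [List.map_map]
    rw [h]
    simp [List.count_eq_zero, hr.ne]

-- the number of occurrences of label k + j is the length of segment j
theorem count_labFrom (segs : List (List Int)) :
    ∀ (k : Int) (j : Nat) (h : j < segs.length),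
      ((labFrom k segs).map Prod.fst).count (k + (j : Int)) = segs[j].length := by
  induction segs with
  | nil => intro k j h; simp at h
  | cons s rest ih =>
    intro k j h
    have hhead : (s.map (fun i => (k, i))).map Prod.fst = s.map (fun _ => k) := by
      simp [List.map_map]
    cases j with
    | zero =>
      simp only [labFrom, List.map_append, List.count_append, hhead,
        Int.natCast_zero, add_zero, List.getElem_cons_zero]
      rw [count_labFrom_lt rest (k + 1) k (by omega)]
      simp
    | succ j =>
      have hj : j < rest.length := by simpa using h
      simp only [labFrom, List.map_append, List.count_append, hhead, List.getElem_cons_succ]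
      have h1 : (s.map (fun _ => k)).count (k + ((j + 1 : Nat) : Int)) = 0 := by
        simp only [List.count_eq_zero]
        intro hmem
        have := List.mem_map.mp hmem
        omega
      have h2 : k + ((j + 1 : Nat) : Int) = (k + 1) + (j : Int) := by push_cast; ring
      rw [h1, h2, ih (k + 1) j hj]
      simp

-- filtering labelled zeros by a per-label predicate = keeping whole segments
theorem filter_labFrom (threshold : Int) (segs : List (List Int)) :
    ∀ (k : Int) (f : Int → Bool),
      (∀ (j : Nat) (h : j < segs.length), f (k + (j : Int)) = decide ((segs[j].length : Int) ≤ threshold)) →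
      ((labFrom k segs).filter (fun p => f p.1)).map Prod.snd = fsKeep threshold segs := by
  induction segs with
  | nil => intro k f _; simp [labFrom, fsKeep]
  | cons s rest ih =>
    intro k f hf
    have hk : f k = decide ((s.length : Int) ≤ threshold) := by
      have := hf 0 (by simp)
      simpa using this
    have htail : ((labFrom (k + 1) rest).filter (fun p => f p.1)).map Prod.snd
        = fsKeep threshold rest := by
      apply ih (k + 1) f
      intro j hj
      have := hf (j + 1) (by simpa using Nat.succ_lt_succ hj)
      have h2 : k + ((j + 1 : Nat) : Int) = (k + 1) + (j : Int) := by push_cast; ring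
      rw [h2] at this
      simpa using this
    have hhead : ((s.map (fun i => (k, i))).filter (fun p => f p.1)).map Prod.snd
        = if (s.length : Int) ≤ threshold then s else [] := by
      rw [List.filter_map]
      have hcomp : ((fun (p : Int × Int) => f p.1) ∘ (fun i : Int => ((k : Int), i))) = (fun _ : Int => f k) := rfl
      rw [hcomp, hk]
      by_cases hle : (s.length : Int) ≤ threshold
      · simp [hle, List.map_map]
      · simp [hle]
    simp only [labFrom, List.filter_append, List.map_append, hhead, htail, fsKeep,
      List.filter_cons]
    by_cases hle : (s.length : Int) ≤ threshold <;> simp [hle]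

-- A's result, characterised through the segment fold
theorem find_showed_eq_keep (is_missed : List Int) (threshold : Int) :
    find_showed is_missed threshold =
      fsKeep threshold
        (((PySem.List.enumerate is_missed).foldl fsStepB ([], [])).1 ++
          [((PySem.List.enumerate is_missed).foldl fsStepB ([], [])).2]) := by
  have h := fsInvA threshold (PySem.List.enumerate is_missed) [] []
  simp only [find_showed]
  rw [show (([] : List Int), (0 : Int), ([] : List Int))
        = (fsKeep threshold [], ((([] : List Int)).length : Int), ([] : List Int)) from rfl, h,
     fsKeep_append_singleton]

-- counting fold over labelled pairs = occurrence count of the label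
theorem getD_foldl_pairs (l : List (Int × Int)) :
    ∀ (d : PySem.Dict Int Int) (r : Int),
      (l.foldl (fun d p => d.insert p.1 (d.getD p.1 0 + 1)) d).getD r 0
        = d.getD r 0 + ((l.map Prod.fst).count r : Int) := by
  induction l with
  | nil => intro d r; simp
  | cons p l ih =>
    intro d r
    rw [List.foldl_cons, ih]
    by_cases hr : r = p.1
    · subst hr
      rw [PySem.Dict.getD_insert]
      simp
      ring
    · rw [PySem.Dict.getD_insert]
      simp [hr, Ne.symm hr]

-- filtering the labelled zeros by their counted run size keeps exactly the short segments
theorem keep_of_labelled (threshold : Int) (segs : List (List Int)) :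
    ((labFrom 0 segs).filter (fun p =>
        ((labFrom 0 segs).foldl (fun d q => d.insert q.1 (d.getD q.1 0 + 1))
          PySem.Dict.empty).getD p.1 0 ≤ threshold)).map Prod.snd
      = fsKeep threshold segs := by
  apply filter_labFrom threshold segs 0
    (fun r => decide (((labFrom 0 segs).foldl
      (fun (d : PySem.Dict Int Int) (q : Int × Int) => d.insert q.1 (d.getD q.1 0 + 1))
      PySem.Dict.empty).getD r 0 ≤ threshold))
  intro j hj
  rw [getD_foldl_pairs]
  have hc := count_labFrom segs 0 j hj
  simp only [zero_add] at hc ⊢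
  rw [hc]
  simp

-- B's result, characterised through the segment fold
theorem find_showed_alt_eq_keep (is_missed : List Int) (threshold : Int) :
    find_showed_alt is_missed threshold =
      fsKeep threshold
        (((PySem.List.enumerate is_missed).foldl fsStepB ([], [])).1 ++
          [((PySem.List.enumerate is_missed).foldl fsStepB ([], [])).2]) := by
  have hz := fsInvZ (PySem.List.enumerate is_missed) [] []
  simp only [labFrom, List.map_nil, List.nil_append, List.length_nil, Int.natCast_zero] at hz
  have hzeros : ((PySem.List.enumerate is_missed).foldl fsZeroStep ([], 0)).1
      = labFrom 0 (((PySem.List.enumerate is_missed).foldl fsStepB ([], [])).1 ++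
          [((PySem.List.enumerate is_missed).foldl fsStepB ([], [])).2]) := by
    rw [hz, labFrom_append_singleton]
    simp
  simp only [find_showed_alt]
  rw [hzeros]
  exact keep_of_labelled threshold _

-- ===== VERDICT (by name: the statement is the Claim_ definition above) =====
theorem find_showed_spec : Claim_equal_find_showed := by
  intro is_missed threshold _
  show find_showed is_missed threshold = find_showed_alt is_missed threshold
  rw [find_showed_eq_keep, find_showed_alt_eq_keep]
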